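-- pv_equiv track=rewrite | github.com/RVitalicS/DonorKit | toolkit/core/geometry.py | createPlaneIndices
-- ===== SOURCE A (Python) =====
-- def createPlaneIndices (divisions: int) -> list:
--     """Create an array of the indices
--     of each vertex of each face in a plane
--
--     Arguments:
--         divisions: The number of subdivisions for a plane
--     Returns:
--         An array of vertex indices
--     """
--     indices = []
--     lineCount = divisions + 2
--     pointsCount = lineCount ** 2
--     for i in range(pointsCount-lineCount):
--         if ((i+1) % lineCount) == 0:
--             continue
--         indices += [i, i+1, i+lineCount+1, i+lineCount]
--     return indices
-- ===== SOURCE B (Python) =====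
-- def createPlaneIndices(divisions):
--     """Create an array of the indices of each vertex of each face in a plane.
--
--     Enumerates the faces directly: face f of the n*n faces (n = divisions+1)
--     has base vertex i = f + f // n, so no scan over grid points and no skip
--     branch is needed.
--     """
--     n = divisions + 1
--     L = divisions + 2
--     return [v
--             for f in range(n * n)
--             for i in [f + f // n]
--             for v in (i, i + 1, i + L + 1, i + L)]
-- ===== Notes on version B (the rewrite author's own statement) =====
-- stated objective: simpler
-- what changed: Replaces A's flat scan over all grid points with a modulo-based skip of last-column points by a direct enumeration of the n*n faces, computing each face's base vertex arithmetically as f + f//n, so no skip branch exists.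
-- outside the precondition, e.g. on createPlaneIndices(-2): A returns [], B returns [0, 1, 1, 0]
import Mathlib
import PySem

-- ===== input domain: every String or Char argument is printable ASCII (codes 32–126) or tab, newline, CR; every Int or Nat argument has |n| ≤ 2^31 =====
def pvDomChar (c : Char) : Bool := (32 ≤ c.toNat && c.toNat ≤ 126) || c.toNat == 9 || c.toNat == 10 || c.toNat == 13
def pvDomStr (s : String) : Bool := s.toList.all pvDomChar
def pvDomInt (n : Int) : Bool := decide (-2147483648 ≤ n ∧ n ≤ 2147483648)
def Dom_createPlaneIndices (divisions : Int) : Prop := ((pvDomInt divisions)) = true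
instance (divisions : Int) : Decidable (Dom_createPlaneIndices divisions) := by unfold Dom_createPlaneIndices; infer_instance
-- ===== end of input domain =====

-- B enumerates the n*n faces directly (base vertex i = f + f//n) instead of
-- A's flat scan over grid points with a modulo-based skip (objective: simpler);
-- return values are equal on the natural domain 0 ≤ divisions.


-- ===== PORT A =====
def createPlaneIndices (divisions : Int) : List Int :=
  let lineCount := divisions + 2
  let pointsCount := lineCount ^ 2
  (PySem.List.pyRange 0 (pointsCount - lineCount) 1).foldl
    (fun indices i =>
      if PySem.Int.mod (i + 1) lineCount = 0 then indices
      else indices ++ [i, i + 1, i + lineCount + 1, i + lineCount]) []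

-- ===== PORT B =====
def createPlaneIndices_alt (divisions : Int) : List Int :=
  let n := divisions + 1
  let L := divisions + 2
  (PySem.List.pyRange 0 (n * n) 1).flatMap (fun f =>
    [f + PySem.Int.floordiv f n].flatMap (fun i =>
      [i, i + 1, i + L + 1, i + L]))

-- ===== PRECONDITION & SPEC =====
-- Pre_ restricts to the natural domain of a subdivision count: for negative
-- divisions A's returned lists (e.g. on -4) are accidents of Python's
-- negative-divisor modulo, outside the function's purpose.
def Pre_createPlaneIndices (divisions : Int) : Prop := 0 ≤ divisions
instance (divisions : Int) : Decidable (Pre_createPlaneIndices divisions) := by unfold Pre_createPlaneIndices; infer_instance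
def pvWitness_createPlaneIndices : Int := 3
def Spec_createPlaneIndices (divisions : Int) (out : List Int) : Prop := out = createPlaneIndices_alt divisions
instance (divisions : Int) (out : List Int) : Decidable (Spec_createPlaneIndices divisions out) := by unfold Spec_createPlaneIndices; infer_instance

-- ===== CLAIM (what is proved, stated in full; the proofs are below) =====
def Claim_equal_createPlaneIndices : Prop := ∀ (divisions : Int), Dom_createPlaneIndices divisions → Pre_createPlaneIndices divisions → Spec_createPlaneIndices divisions (createPlaneIndices divisions)

-- ===== LEMMAS AND PROOFS =====

-- 'continue'-shaped foldl as a flatMap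
theorem pv_foldl_skip {α : Type} (P : α → Prop) [DecidablePred P] (g : α → List Int) :
    ∀ (l : List α) (acc : List Int),
      l.foldl (fun acc x => if P x then acc else acc ++ g x) acc
        = acc ++ l.flatMap (fun x => if P x then [] else g x) := by
  intro l
  induction l with
  | nil => simp
  | cons x xs ih =>
    intro acc
    by_cases h : P x <;> simp [h, ih]

-- split a flatMap over range (m*n) into m rows of n
theorem pv_range_rows (g : Nat → List Int) (n : Nat) :
    ∀ (m : Nat), (List.range (m * n)).flatMap g
      = (List.range m).flatMap (fun r => (List.range n).flatMap (fun c => g (r * n + c))) := by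
  intro m
  induction m with
  | zero => simp
  | succ m ih =>
    have h1 : (m + 1) * n = m * n + n := by ring
    rw [h1, List.range_add, List.flatMap_append, ih, List.range_succ, List.flatMap_append]
    simp [List.flatMap_map]

theorem createPlaneIndices_spec' (divisions : Int) (h : 0 ≤ divisions) :
    createPlaneIndices divisions = createPlaneIndices_alt divisions := by
  simp only [createPlaneIndices, createPlaneIndices_alt]
  set L := divisions + 2 with hLdef
  have hL : 2 ≤ L := by omega
  obtain ⟨m, hm⟩ : ∃ m : Nat, (m : Int) = L := ⟨L.toNat, by omega⟩
  have hm2 : 2 ≤ m := by omega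
  rw [pv_foldl_skip (fun i => PySem.Int.mod (i + 1) L = 0) (fun i => [i, i + 1, i + L + 1, i + L])]
  simp only [List.nil_append]
  -- rewrite both index ranges as Nat ranges
  have hPts : L ^ 2 - L = (((m - 1) * m : Nat) : Int) := by
    have : (m - 1) * m = m * m - m := by cases m <;> simp [Nat.succ_mul, Nat.mul_succ]
    rw [this]
    push_cast [Nat.cast_sub (by nlinarith : m ≤ m * m)]
    rw [← hm]; ring
  have hN : divisions + 1 = (((m - 1) : Nat) : Int) := by omega
  have hFaces : (divisions + 1) * (divisions + 1) = (((m - 1) * (m - 1) : Nat) : Int) := by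
    rw [hN]; push_cast; ring
  rw [hPts, hFaces, PySem.List.pyRange_zero_nat, PySem.List.pyRange_zero_nat,
      List.flatMap_map, List.flatMap_map, pv_range_rows, pv_range_rows]
  apply List.flatMap_congr
  intro r hr
  rw [List.mem_range] at hr
  -- LEFT row: split the row's point range; the last point of each line starts no face
  have hsplit : List.range m = List.range (m - 1) ++ [m - 1] := by
    have : m = (m - 1) + 1 := by omega
    rw [this, List.range_succ]; simp
  rw [hsplit, List.flatMap_append]
  have hmodL : PySem.Int.mod ((↑(r * m + (m - 1)) : Int) + 1) L = 0 := by
    rw [PySem.Int.mod_eq_emod_of_pos (by omega)]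
    have he : ((↑(r * m + (m - 1)) : Int) + 1) = (↑r + 1) * L := by
      push_cast [Nat.cast_sub (by omega : 1 ≤ m)]
      rw [← hm]; ring
    rw [he, Int.mul_emod_left]
  rw [List.flatMap_singleton, if_pos hmodL, List.append_nil]
  -- per column: A's kept point index r*m+c equals B's face base f + f//n with f = r*(m-1)+c
  apply List.flatMap_congr
  intro c hc
  rw [List.mem_range] at hc
  have hmod : PySem.Int.mod ((↑(r * m + c) : Int) + 1) L ≠ 0 := by
    rw [PySem.Int.mod_eq_emod_of_pos (by omega)]
    have h1 : ((↑(r * m + c) : Int) + 1) = (↑c + 1) + L * ↑r := by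
      push_cast; rw [← hm]; ring
    rw [h1, Int.add_mul_emod_self_left, Int.emod_eq_of_lt (by omega) (by omega)]
    omega
  rw [if_neg hmod, List.flatMap_singleton]
  have hdiv : PySem.Int.floordiv (↑(r * (m - 1) + c) : Int) (divisions + 1) = ↑r := by
    refine (PySem.Int.floordiv_eq_iff_of_pos (by omega)).2 ⟨?_, ?_⟩
    · rw [hN]; push_cast [Nat.cast_sub (by omega : 1 ≤ m)]; nlinarith
    · rw [hN]; push_cast [Nat.cast_sub (by omega : 1 ≤ m)]; nlinarith
  rw [hdiv]
  have hcast : (↑(r * m + c) : Int) = (↑(r * (m - 1) + c) : Int) + ↑r := by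
    push_cast [Nat.cast_sub (by omega : 1 ≤ m)]; ring
  rw [hcast]

-- ===== VERDICT (by name: the statement is the Claim_ definition above) =====
theorem createPlaneIndices_spec : Claim_equal_createPlaneIndices := by
  intro d _ hpre
  unfold Spec_createPlaneIndices
  exact createPlaneIndices_spec' d hpre
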